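-- pv_equiv track=rewrite | github.com/arturoornelasb/tibia-bonelord-469-cipher | scripts/analysis/session24_deep_language_research.py | anagram_match
-- ===== SOURCE A (Python) =====
-- from collections import Counter, defaultdict
--
-- def anagram_match(block, word, plus=0):
--     """Check if block is an anagram of word (+plus extra letters in block)."""
--     bc = Counter(block)
--     wc = Counter(word)
--     for ch, cnt in wc.items():
--         if bc.get(ch, 0) < cnt:
--             return False
--     extra = sum(bc.values()) - sum(wc.values())
--     return 0 <= extra <= plus
-- ===== SOURCE B (Python) =====
-- def anagram_match(block, word, plus=0):
--     """Check if block is an anagram of word (+plus extra letters in block)."""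
--     rest = list(block)
--     for ch in word:
--         if ch not in rest:
--             return False
--         rest.remove(ch)
--     extra = len(rest)
--     return 0 <= extra <= plus
-- ===== Notes on version B (the rewrite author's own statement) =====
-- stated objective: alternative
-- what changed: B does no counting at all: it keeps a working copy of block as a list and removes one matching letter per character of word (failing when none is left), then checks the length of the leftover list against plus.
import Mathlib
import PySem

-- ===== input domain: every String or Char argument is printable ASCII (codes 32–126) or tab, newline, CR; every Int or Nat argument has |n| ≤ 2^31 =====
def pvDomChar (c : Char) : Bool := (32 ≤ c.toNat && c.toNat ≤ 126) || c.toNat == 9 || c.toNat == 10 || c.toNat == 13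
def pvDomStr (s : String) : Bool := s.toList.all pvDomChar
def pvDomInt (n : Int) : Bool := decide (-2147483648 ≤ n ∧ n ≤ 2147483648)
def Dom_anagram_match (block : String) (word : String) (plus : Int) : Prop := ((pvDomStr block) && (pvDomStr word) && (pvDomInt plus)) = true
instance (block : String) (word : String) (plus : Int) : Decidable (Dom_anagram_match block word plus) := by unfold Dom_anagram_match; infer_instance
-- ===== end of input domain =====

-- B does no counting: it removes one matching letter from a working copy of block per
-- character of word and checks the leftover length; objective: alternative algorithm.

-- ===== PORT A =====
def anagram_match (block : String) (word : String) (plus : Int) : Bool :=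
  let bc := PySem.Dict.counter block.toList
  let wc := PySem.Dict.counter word.toList
  if wc.items.any (fun p => decide (bc.getD p.1 0 < p.2)) then false
  else
    let extra := bc.values.sum - wc.values.sum
    decide (0 ≤ extra ∧ extra ≤ plus)

-- ===== PORT B =====
-- the `for ch in word` loop with its early `return False`; `ch not in rest` + `rest.remove(ch)`
-- is exactly PySem.List.remove? (none iff the letter is absent)
def pvRemLoop (rest : List Char) (w : List Char) (plus : Int) : Bool :=
  match w with
  | [] => decide (0 ≤ (rest.length : Int) ∧ (rest.length : Int) ≤ plus)
  | ch :: ws =>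
    match PySem.List.remove? rest ch with
    | none => false
    | some r => pvRemLoop r ws plus

def anagram_match_alt (block : String) (word : String) (plus : Int) : Bool :=
  pvRemLoop block.toList word.toList plus

-- ===== PRECONDITION & SPEC =====
def Spec_anagram_match (block : String) (word : String) (plus : Int) (out : Bool) : Prop := out = anagram_match_alt block word plus
instance (block : String) (word : String) (plus : Int) (out : Bool) : Decidable (Spec_anagram_match block word plus out) := by unfold Spec_anagram_match; infer_instance

-- ===== CLAIM (what is proved, stated in full; the proofs are below) =====
def Claim_equal_anagram_match : Prop := ∀ (block : String) (word : String) (plus : Int), Dom_anagram_match block word plus → Spec_anagram_match block word plus (anagram_match block word plus)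

-- ===== LEMMAS AND PROOFS =====

-- pointwise sum of mapped sums
theorem pv_sum_map_add (K : List Char) (f g : Char → Int) :
    (K.map (fun k => f k + g k)).sum = (K.map f).sum + (K.map g).sum := by
  induction K with
  | nil => simp
  | cons k ks ih => simp [ih]; ring

-- sum of an indicator over a nodup list containing x
theorem pv_sum_indicator (K : List Char) (x : Char) (hnd : K.Nodup) (hx : x ∈ K) :
    (K.map (fun c => if c = x then (1 : Int) else 0)).sum = 1 := by
  induction K with
  | nil => cases hx
  | cons k ks ih =>
    rw [List.nodup_cons] at hnd
    rcases List.mem_cons.mp hx with h | h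
    · subst h
      have hz : (ks.map (fun c => if c = x then (1 : Int) else 0)).sum = 0 := by
        apply List.sum_eq_zero
        intro y hy
        rcases List.mem_map.mp hy with ⟨c, hc, rfl⟩
        have hcx : c ≠ x := fun e => hnd.1 (e ▸ hc)
        simp [hcx]
      simp [hz]
    · have hne : k ≠ x := fun e => hnd.1 (e ▸ h)
      simp only [List.map_cons, List.sum_cons, if_neg hne, ih hnd.2 h]
      ring

-- summing counts of l over any nodup superset of l's elements gives l.length
theorem pv_sum_count (l K : List Char) (hnd : K.Nodup) (hsub : ∀ c ∈ l, c ∈ K) :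
    (K.map (fun c => (l.count c : Int))).sum = l.length := by
  induction l with
  | nil => simp
  | cons x xs ih =>
    have h1 : (K.map (fun c => ((x :: xs).count c : Int))).sum
        = (K.map (fun c => (xs.count c : Int))).sum
          + (K.map (fun c => if c = x then (1 : Int) else 0)).sum := by
      rw [← pv_sum_map_add]
      apply congrArg
      apply List.map_congr_left
      intro c _
      by_cases h : c = x
      · simp [h]
      · have h' : ¬ x = c := fun e => h e.symm
        simp [h, h']
    rw [h1, ih (fun c hc => hsub c (List.mem_cons_of_mem _ hc)),
        pv_sum_indicator K x hnd (hsub x (List.mem_cons_self))]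
    rw [List.length_cons]
    push_cast
    ring

-- characterisation of B's removal loop by counts and lengths
theorem pvRemLoop_eq (w b : List Char) (plus : Int) :
    pvRemLoop b w plus
      = if ∃ c ∈ w, b.count c < w.count c then false
        else decide (0 ≤ (b.length : Int) - w.length ∧ (b.length : Int) - w.length ≤ plus) := by
  induction w generalizing b with
  | nil => simp [pvRemLoop]
  | cons ch ws ih =>
    by_cases hmem : ch ∈ b
    · have hrem : PySem.List.remove? b ch = some (b.erase ch) :=
        PySem.List.remove?_eq_some_erase b ch hmem
      have hlen : (b.erase ch).length = b.length - 1 := List.length_erase_of_mem hmem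
      have hpos : 1 ≤ b.length := List.length_pos_of_mem hmem
      have hbc : 0 < b.count ch := List.count_pos_iff.mpr hmem
      have hce : ∀ x, (b.erase ch).count x = b.count x - (if x = ch then 1 else 0) := by
        intro x
        by_cases hxc : x = ch
        · subst hxc; rw [List.count_erase_self]; simp
        · rw [List.count_erase_of_ne hxc]; simp [hxc]
      have hcc : ∀ x, (ch :: ws).count x = ws.count x + (if x = ch then 1 else 0) := by
        intro x
        by_cases hxc : x = ch
        · subst hxc; simp [List.count_cons_self]
        · simp [hxc, Ne.symm hxc]
      have hcond : (∃ c ∈ ws, (b.erase ch).count c < ws.count c)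
          ↔ (∃ c ∈ ch :: ws, b.count c < (ch :: ws).count c) := by
        constructor
        · rintro ⟨x, hx, hlt⟩
          refine ⟨x, List.mem_cons_of_mem _ hx, ?_⟩
          have h1 := hce x
          have h2 := hcc x
          by_cases hxc : x = ch
          · subst hxc; rw [if_pos rfl] at h1 h2; omega
          · simp only [if_neg hxc] at h1 h2; omega
        · rintro ⟨x, hx, hlt⟩
          by_cases hxc : x = ch
          · subst hxc
            have h1 := hce x
            have h2 := hcc x
            rw [if_pos rfl] at h1 h2
            have hws : 0 < ws.count x := by omega
            exact ⟨x, List.count_pos_iff.mp hws, by omega⟩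
          · rcases List.mem_cons.mp hx with h | h
            · exact absurd h hxc
            · have h1 := hce x
              have h2 := hcc x
              simp only [if_neg hxc] at h1 h2
              exact ⟨x, h, by omega⟩
      simp only [pvRemLoop, hrem]
      rw [ih]
      by_cases hc : ∃ c ∈ ch :: ws, b.count c < (ch :: ws).count c
      · rw [if_pos (hcond.mpr hc), if_pos hc]
      · rw [if_neg (fun h => hc (hcond.mp h)), if_neg hc]
        have heq : ((b.erase ch).length : Int) - ws.length
            = (b.length : Int) - (ch :: ws).length := by
          rw [hlen, List.length_cons]
          push_cast [Nat.cast_sub hpos]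
          ring
        rw [heq]
    · have hrem : PySem.List.remove? b ch = none :=
        (PySem.List.remove?_eq_none_iff b ch).mpr hmem
      have hc : ∃ c ∈ ch :: ws, b.count c < (ch :: ws).count c := by
        refine ⟨ch, List.mem_cons_self, ?_⟩
        rw [List.count_eq_zero.mpr hmem, List.count_cons_self]
        omega
      simp only [pvRemLoop, hrem]
      rw [if_pos hc]

theorem anagram_match_eq_alt (block word : String) (plus : Int) :
    anagram_match block word plus = anagram_match_alt block word plus := by
  simp only [anagram_match, anagram_match_alt]
  set B := block.toList with hB
  set W := word.toList with hW
  -- A's loop condition is the count-deficiency condition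
  have hcond : ((PySem.Dict.counter W).items.any
        (fun p => decide ((PySem.Dict.counter B).getD p.1 0 < p.2)))
      = decide (∃ c ∈ W, B.count c < W.count c) := by
    rw [Bool.eq_iff_iff]
    simp only [List.any_eq_true, decide_eq_true_eq, PySem.Dict.items_counter, List.mem_map]
    constructor
    · rintro ⟨p, ⟨c, hc, rfl⟩, hlt⟩
      simp only [PySem.Dict.getD_counter] at hlt
      exact ⟨c, (PySem.Set.mem_ofList _ _).mp hc, by exact_mod_cast hlt⟩
    · rintro ⟨c, hc, hlt⟩
      exact ⟨(c, (W.count c : Int)), ⟨c, (PySem.Set.mem_ofList _ _).mpr hc, rfl⟩, by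
        simp only [PySem.Dict.getD_counter]; exact_mod_cast hlt⟩
  -- A's counter sums are the lengths
  have hsumB : (PySem.Dict.counter B).values.sum = (B.length : Int) := by
    rw [PySem.Dict.values_eq_map_keys _ (PySem.Dict.nodup_keys_counter B) 0]
    rw [List.map_congr_left (fun k _ => PySem.Dict.getD_counter B k),
        PySem.Dict.keys_counter]
    exact pv_sum_count B _ (PySem.Set.nodup_ofList B) (fun c hc => (PySem.Set.mem_ofList _ _).mpr hc)
  have hsumW : (PySem.Dict.counter W).values.sum = (W.length : Int) := by
    rw [PySem.Dict.values_eq_map_keys _ (PySem.Dict.nodup_keys_counter W) 0]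
    rw [List.map_congr_left (fun k _ => PySem.Dict.getD_counter W k),
        PySem.Dict.keys_counter]
    exact pv_sum_count W _ (PySem.Set.nodup_ofList W) (fun c hc => (PySem.Set.mem_ofList _ _).mpr hc)
  rw [hcond, hsumB, hsumW, pvRemLoop_eq]
  by_cases hc : ∃ c ∈ W, B.count c < W.count c
  · rw [if_pos hc]
    simp [hc]
  · rw [if_neg hc]
    simp [hc]

-- ===== VERDICT (by name: the statement is the Claim_ definition above) =====
theorem anagram_match_spec : Claim_equal_anagram_match := by
  intro block word plus _
  unfold Spec_anagram_match
  exact anagram_match_eq_alt block word plus
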